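-- pv_equiv track=rewrite | github.com/jhurlocker/vllm_config_estimator | vllm_start_config_from_estimate.py | choose_max_model_len
-- ===== SOURCE A (Python) =====
-- from typing import Dict, List, Optional, Tuple, Set
--
-- def choose_max_model_len(
--     user_value: Optional[int],
--     input_len: int,
--     output_len: int,
--     hf_max_ctx: Optional[int],
-- ) -> int:
--     """
--     Computes a practical max_model_len constraint based on requested input/output sizes and model limits,
--     snapping to power-of-two boundaries for better cache efficiency where possible.
--
--     Args:
--         user_value: Explicit user-provided max_model_len override.
--         input_len: Expected maximum input length.
--         output_len: Expected maximum output length.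
--         hf_max_ctx: Model's native maximum context window from its config.
--
--     Returns:
--         The suggested max_model_len limit.
--     """
--     if user_value:
--         return user_value
--
--     target = max(4096, int((input_len + output_len) * 2))
--
--     if hf_max_ctx:
--         if target > hf_max_ctx:
--             target = hf_max_ctx
--         if target < (input_len + output_len):
--             target = input_len + output_len
--
--     for snap in (4096, 8192, 16384, 32768, 65536, 131072):
--         if target <= snap:
--             return snap
--
--     return target
-- ===== SOURCE B (Python) =====
-- def choose_max_model_len(user_value, input_len, output_len, hf_max_ctx):
--     if user_value:
--         return user_value
--     s = input_len + output_len
--     target = max(4096, 2 * s)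
--     if hf_max_ctx:
--         target = min(target, hf_max_ctx)
--         target = max(target, s)
--     if target > 131072:
--         return target
--     if target <= 4096:
--         return 4096
--     return 1 << (target - 1).bit_length()
-- ===== Notes on version B (the rewrite author's own statement) =====
-- stated objective: idiomatic
-- what changed: The six-step snap ladder scan is replaced by a closed-form power-of-two computation: 1 << (target-1).bit_length(), with explicit 4096 floor and 131072 passthrough.
import Mathlib
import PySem

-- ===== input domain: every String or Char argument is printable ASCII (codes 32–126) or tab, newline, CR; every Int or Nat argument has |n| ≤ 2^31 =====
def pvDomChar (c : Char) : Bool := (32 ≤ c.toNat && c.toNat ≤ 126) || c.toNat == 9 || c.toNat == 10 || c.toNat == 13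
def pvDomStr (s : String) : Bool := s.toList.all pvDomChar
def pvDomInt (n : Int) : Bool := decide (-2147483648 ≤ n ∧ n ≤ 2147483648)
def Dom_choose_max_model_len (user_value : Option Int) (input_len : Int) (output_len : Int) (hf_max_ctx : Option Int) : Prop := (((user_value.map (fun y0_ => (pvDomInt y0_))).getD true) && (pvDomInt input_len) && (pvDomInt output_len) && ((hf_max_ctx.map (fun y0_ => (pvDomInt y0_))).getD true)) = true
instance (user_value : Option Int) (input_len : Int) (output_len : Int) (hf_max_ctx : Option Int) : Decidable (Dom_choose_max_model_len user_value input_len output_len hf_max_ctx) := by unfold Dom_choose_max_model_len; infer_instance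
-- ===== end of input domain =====

-- B replaces A's six-step snap-ladder scan by a closed-form power-of-two bit_length computation (idiomatic; same cost).

-- Python truthiness of an Optional[int]: None and 0 are falsy (used by both ports for 'if user_value:' / 'if hf_max_ctx:')
def pyTruthyOpt : Option Int → Bool
  | none => false
  | some v => v != 0

-- ===== PORT A =====
-- the 'for snap in (...)' loop: first snap with target ≤ snap, else target
def snapLoop : List Int → Int → Int
  | [], t => t
  | s :: rest, t => if t ≤ s then s else snapLoop rest t

def choose_max_model_len (user_value : Option Int) (input_len : Int) (output_len : Int) (hf_max_ctx : Option Int) : Int :=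
  if pyTruthyOpt user_value then user_value.getD 0
  else
    let target0 : Int := max 4096 ((input_len + output_len) * 2)
    let target1 : Int :=
      if pyTruthyOpt hf_max_ctx then
        let hv := hf_max_ctx.getD 0
        let t1 := if target0 > hv then hv else target0
        if t1 < input_len + output_len then input_len + output_len else t1
      else target0
    snapLoop [4096, 8192, 16384, 32768, 65536, 131072] target1

-- ===== PORT B =====
-- closed-form snap: target itself above the ladder, floor 4096, else the least power of two ≥ target
def snapClosed (target : Int) : Int :=
  if target > 131072 then target
  else if target ≤ 4096 then 4096
  else 2 ^ (PySem.Int.bitLength (target - 1))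

def choose_max_model_len_alt (user_value : Option Int) (input_len : Int) (output_len : Int) (hf_max_ctx : Option Int) : Int :=
  if pyTruthyOpt user_value then user_value.getD 0
  else
    let s : Int := input_len + output_len
    let target0 : Int := max 4096 (2 * s)
    let target : Int :=
      if pyTruthyOpt hf_max_ctx then max (min target0 (hf_max_ctx.getD 0)) s
      else target0
    snapClosed target

-- ===== PRECONDITION & SPEC =====
def Spec_choose_max_model_len (user_value : Option Int) (input_len : Int) (output_len : Int) (hf_max_ctx : Option Int) (out : Int) : Prop := out = choose_max_model_len_alt user_value input_len output_len hf_max_ctx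
instance (user_value : Option Int) (input_len : Int) (output_len : Int) (hf_max_ctx : Option Int) (out : Int) : Decidable (Spec_choose_max_model_len user_value input_len output_len hf_max_ctx out) := by unfold Spec_choose_max_model_len; infer_instance

-- ===== CLAIM (what is proved, stated in full; the proofs are below) =====
def Claim_equal_choose_max_model_len : Prop := ∀ (user_value : Option Int) (input_len : Int) (output_len : Int) (hf_max_ctx : Option Int), Dom_choose_max_model_len user_value input_len output_len hf_max_ctx → Spec_choose_max_model_len user_value input_len output_len hf_max_ctx (choose_max_model_len user_value input_len output_len hf_max_ctx)

-- ===== LEMMAS AND PROOFS =====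

theorem bitLength_eq_of_bounds (n : Int) (k : ℕ) (hpos : 0 < n)
    (hlo : 2 ^ k ≤ n.natAbs) (hhi : n.natAbs < 2 ^ (k + 1)) :
    PySem.Int.bitLength n = k + 1 := by
  have hne : n ≠ 0 := by omega
  have h1 := PySem.Int.lt_two_pow_bitLength n
  have h2 := PySem.Int.two_pow_bitLength_le n hne
  have hk : k < PySem.Int.bitLength n := by
    have := lt_of_le_of_lt hlo h1
    exact (Nat.pow_lt_pow_iff_right (by norm_num)).mp this
  have hk2 : PySem.Int.bitLength n - 1 < k + 1 := by
    have := lt_of_le_of_lt h2 hhi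
    exact (Nat.pow_lt_pow_iff_right (by norm_num)).mp this
  omega

theorem pow_bitLength_sub_one (t : Int) (k : ℕ)
    (hlo : (2 : Int) ^ k < t) (hhi : t ≤ 2 ^ (k + 1)) :
    (2 : Int) ^ (PySem.Int.bitLength (t - 1)) = 2 ^ (k + 1) := by
  have hkpos : (0 : Int) < 2 ^ k := by positivity
  have hpos : 0 < t - 1 := by omega
  have habs : (t - 1).natAbs = (t - 1).toNat := by omega
  have hc : ((2 ^ k : ℕ) : Int) = 2 ^ k := by push_cast; ring
  have hc2 : ((2 ^ (k + 1) : ℕ) : Int) = 2 ^ (k + 1) := by push_cast; ring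
  rw [← hc] at hlo
  rw [← hc2] at hhi
  have hloN : 2 ^ k ≤ (t - 1).natAbs := by omega
  have hhiN : (t - 1).natAbs < 2 ^ (k + 1) := by omega
  rw [bitLength_eq_of_bounds (t - 1) k hpos hloN hhiN]

theorem snap_eq (t : Int) :
    snapLoop [4096, 8192, 16384, 32768, 65536, 131072] t = snapClosed t := by
  simp only [snapLoop, snapClosed]
  by_cases h0 : t ≤ 4096
  · simp only [if_neg (by omega : ¬ t > 131072), if_pos h0]
  by_cases h1 : t ≤ 8192
  · have : (2 : Int) ^ (PySem.Int.bitLength (t - 1)) = 2 ^ 13 :=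
      pow_bitLength_sub_one t 12 (by norm_num; omega) (by norm_num; omega)
    simp only [if_neg (by omega : ¬ t > 131072), if_neg (by omega : ¬ t ≤ 4096), if_pos h1, this]; norm_num
  by_cases h2 : t ≤ 16384
  · have : (2 : Int) ^ (PySem.Int.bitLength (t - 1)) = 2 ^ 14 :=
      pow_bitLength_sub_one t 13 (by norm_num; omega) (by norm_num; omega)
    simp only [if_neg (by omega : ¬ t > 131072), if_neg h1, if_neg (by omega : ¬ t ≤ 4096), if_pos h2, this]; norm_num
  by_cases h3 : t ≤ 32768
  · have : (2 : Int) ^ (PySem.Int.bitLength (t - 1)) = 2 ^ 15 :=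
      pow_bitLength_sub_one t 14 (by norm_num; omega) (by norm_num; omega)
    simp only [if_neg (by omega : ¬ t > 131072), if_neg h1, if_neg h2, if_neg (by omega : ¬ t ≤ 4096), if_pos h3, this]; norm_num
  by_cases h4 : t ≤ 65536
  · have : (2 : Int) ^ (PySem.Int.bitLength (t - 1)) = 2 ^ 16 :=
      pow_bitLength_sub_one t 15 (by norm_num; omega) (by norm_num; omega)
    simp only [if_neg (by omega : ¬ t > 131072), if_neg h1, if_neg h2, if_neg h3, if_neg (by omega : ¬ t ≤ 4096), if_pos h4, this]; norm_num
  by_cases h5 : t ≤ 131072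
  · have : (2 : Int) ^ (PySem.Int.bitLength (t - 1)) = 2 ^ 17 :=
      pow_bitLength_sub_one t 16 (by norm_num; omega) (by norm_num; omega)
    simp only [if_neg (by omega : ¬ t > 131072), if_neg h1, if_neg h2, if_neg h3, if_neg h4, if_neg (by omega : ¬ t ≤ 4096), if_pos h5, this]; norm_num
  · simp only [if_neg h0, if_neg h1, if_neg h2, if_neg h3, if_neg h4, if_neg h5, if_pos (by omega : t > 131072)]

-- ===== VERDICT (by name: the statement is the Claim_ definition above) =====
theorem choose_max_model_len_spec : Claim_equal_choose_max_model_len := by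
  intro u i o h _
  unfold Spec_choose_max_model_len choose_max_model_len choose_max_model_len_alt
  by_cases hu : pyTruthyOpt u = true
  · simp only [if_pos hu]
  · simp only [if_neg hu]
    by_cases hh : pyTruthyOpt h = true
    · simp only [if_pos hh]
      rw [snap_eq]
      congr 1
      simp [Int.min_def, Int.max_def]
      split_ifs <;> omega
    · simp only [if_neg hh]
      rw [snap_eq]
      congr 1
      omega
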